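-- pv_equiv track=rewrite | github.com/MadhanReddy13/MapUp-DA-Assessment-2024 | submissions/python_section_1.py | rotate_and_multiply_matrix
-- ===== SOURCE A (Python) =====
-- from typing import Dict, List
--
-- def rotate_and_multiply_matrix(matrix: List[List[int]]) -> List[List[int]]:
--     """
--     Rotate the given matrix by 90 degrees clockwise, then multiply each element
--     by the sum of its original row and column index before rotation.
--     """
--
--     rotated = [list(row) for row in zip(*matrix[::-1])]
--     transformed_matrix = []
--     for i in range(len(rotated)):
--         new_row = []
--         for j in range(len(rotated[0])):
--             new_value = rotated[i][j] * (i + j)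
--             new_row.append(new_value)
--         transformed_matrix.append(new_row)
--
--     return transformed_matrix
-- ===== SOURCE B (Python) =====
-- def rotate_and_multiply_matrix(matrix):
--     """Incremental column-append fold: process source rows bottom-up, gluing each
--     as the next column of the output with the (i+j) scale woven in; no transpose stage."""
--     out = [[] for _ in matrix[-1]] if matrix else []
--     for j, row in enumerate(reversed(matrix)):
--         out = [oi + [v * (i + j)] for i, (oi, v) in enumerate(zip(out, row))]
--     return out
-- ===== Notes on version B (the rewrite author's own statement) =====
-- stated objective: alternative
-- what changed: B never builds the rotated matrix: it folds over the source rows bottom-up, gluing each row onto the accumulator as the next output column with the (i+j) scale applied during the append, instead of A's two-stage reverse+zip transpose followed by an index-loop rescan.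
import Mathlib
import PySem

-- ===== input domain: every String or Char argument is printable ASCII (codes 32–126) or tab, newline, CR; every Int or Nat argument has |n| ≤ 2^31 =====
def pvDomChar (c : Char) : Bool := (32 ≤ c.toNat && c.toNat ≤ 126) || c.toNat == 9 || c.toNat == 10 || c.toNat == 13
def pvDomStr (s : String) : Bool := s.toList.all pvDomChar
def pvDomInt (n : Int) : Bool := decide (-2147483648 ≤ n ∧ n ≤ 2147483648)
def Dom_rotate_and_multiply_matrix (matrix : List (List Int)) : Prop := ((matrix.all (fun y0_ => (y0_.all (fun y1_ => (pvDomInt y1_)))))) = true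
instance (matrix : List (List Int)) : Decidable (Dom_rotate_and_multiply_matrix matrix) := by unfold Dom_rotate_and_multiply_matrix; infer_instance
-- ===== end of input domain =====

-- B replaces A's materialize-rotation-then-rescan with a bottom-up fold over the source
-- rows, gluing each row onto the accumulator as the next output column with the (i+j)
-- scale applied during the append; objective: an alternative decomposition (not faster).

-- ===== PORT A =====
-- hand port of zip(*rows), exact: truncates at the shortest row; zip of no arguments is []
def pyZipStar (rows : List (List Int)) : List (List Int) :=
  if h : rows ≠ [] ∧ rows.all (fun r => !r.isEmpty) then
    (rows.map (fun r => r.headD 0)) :: pyZipStar (rows.map (fun r => r.tail))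
  else []
termination_by (rows.headD []).length
decreasing_by
  obtain ⟨h1, h2⟩ := h
  cases rows with
  | nil => exact absurd rfl h1
  | cons r rest =>
    simp only [List.headD_cons]
    have hr : r ≠ [] := by
      have := h2; simp [List.all_cons] at this
      exact List.ne_nil_iff_length_pos.mpr (by cases r <;> simp_all)
    cases r with
    | nil => exact absurd rfl hr
    | cons a as => simp

def rotate_and_multiply_matrix (matrix : List (List Int)) : List (List Int) :=
  -- rotated = [list(row) for row in zip(*matrix[::-1])]  (matrix[::-1] = reverse, exact)
  let rotated := pyZipStar matrix.reverse
  -- the two explicit index loops, appending row by row / element by element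
  -- (rotated[0] is only reached when the outer range is nonempty, so the [] default is never used)
  (PySem.List.pyRange 0 (PySem.List.len rotated) 1).foldl (fun acc i =>
    acc ++ [(PySem.List.pyRange 0 (PySem.List.len (PySem.List.pyGetD rotated 0 [])) 1).foldl
      (fun row j =>
        row ++ [PySem.List.pyGetD (PySem.List.pyGetD rotated i []) j 0 * (i + j)]) []]) []

-- ===== PORT B =====
def rotate_and_multiply_matrix_alt (matrix : List (List Int)) : List (List Int) :=
  -- out = [[] for _ in matrix[-1]] if matrix else []
  let init : List (List Int) :=
    if matrix.isEmpty then [] else (matrix.getLastD []).map (fun _ => [])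
  -- for j, row in enumerate(reversed(matrix)):
  --     out = [oi + [v * (i + j)] for i, (oi, v) in enumerate(zip(out, row))]
  (PySem.List.enumerate matrix.reverse 0).foldl
    (fun out jrow =>
      (PySem.List.enumerate (out.zip jrow.2) 0).map
        (fun p => p.2.1 ++ [p.2.2 * (p.1 + jrow.1)]))
    init

-- ===== PRECONDITION & SPEC =====
def Spec_rotate_and_multiply_matrix (matrix : List (List Int)) (out : List (List Int)) : Prop := out = rotate_and_multiply_matrix_alt matrix
instance (matrix : List (List Int)) (out : List (List Int)) : Decidable (Spec_rotate_and_multiply_matrix matrix out) := by unfold Spec_rotate_and_multiply_matrix; infer_instance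

-- ===== CLAIM (what is proved, stated in full; the proofs are below) =====
def Claim_equal_rotate_and_multiply_matrix : Prop := ∀ (matrix : List (List Int)), Dom_rotate_and_multiply_matrix matrix → Spec_rotate_and_multiply_matrix matrix (rotate_and_multiply_matrix matrix)

-- ===== LEMMAS AND PROOFS =====

-- min of the row lengths (0 for no rows): the common column count of zip(*rows)
def pvMinCols (matrix : List (List Int)) : Nat :=
  match matrix with
  | [] => 0
  | r :: rest => rest.foldl (fun acc s => min acc s.length) r.length

theorem foldl_min_acc (t : List (List Int)) (a b : Nat) :
    t.foldl (fun acc s => min acc s.length) (min a b) =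
      min a (t.foldl (fun acc s => min acc s.length) b) := by
  induction t generalizing b with
  | nil => rfl
  | cons s t ih => simp only [List.foldl_cons]; rw [min_assoc, ih]

theorem pvMinCols_cons (r : List Int) (rest : List (List Int)) :
    pvMinCols (r :: rest) =
      if rest.isEmpty then r.length else min r.length (pvMinCols rest) := by
  cases rest with
  | nil => simp [pvMinCols]
  | cons s t =>
    simp only [pvMinCols, List.isEmpty_cons, Bool.false_eq_true, if_false, List.foldl_cons]
    exact foldl_min_acc t r.length s.length

theorem pvMinCols_le (l : List (List Int)) (r : List Int) (hr : r ∈ l) :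
    pvMinCols l ≤ r.length := by
  induction l with
  | nil => cases hr
  | cons s t ih =>
    rw [pvMinCols_cons]
    rcases List.mem_cons.mp hr with h | h
    · subst h
      cases t with
      | nil => simp
      | cons u v => simp
    · have ht : t ≠ [] := by rintro rfl; cases h
      rw [if_neg (by simpa [List.isEmpty_iff] using ht)]
      exact le_trans (min_le_right _ _) (ih h)

theorem pvMinCols_mem (l : List (List Int)) (hl : l ≠ []) :
    ∃ r ∈ l, pvMinCols l = r.length := by
  induction l with
  | nil => exact absurd rfl hl
  | cons s t ih =>
    rw [pvMinCols_cons]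
    cases t with
    | nil => exact ⟨s, by simp⟩
    | cons u v =>
      obtain ⟨r, hr, he⟩ := ih (by simp)
      rw [if_neg (by simp)]
      rcases min_cases s.length (pvMinCols (u :: v)) with ⟨hm, _⟩ | ⟨hm, _⟩
      · exact ⟨s, by simp, hm⟩
      · exact ⟨r, List.mem_cons_of_mem _ hr, by rw [hm, he]⟩

theorem pvMinCols_reverse (l : List (List Int)) :
    pvMinCols l.reverse = pvMinCols l := by
  rcases eq_or_ne l [] with rfl | hl
  · rfl
  · apply Nat.le_antisymm
    · obtain ⟨r, hr, he⟩ := pvMinCols_mem l hl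
      rw [he]; exact pvMinCols_le _ _ (List.mem_reverse.mpr hr)
    · obtain ⟨r, hr, he⟩ := pvMinCols_mem l.reverse (by simpa using hl)
      rw [he]; exact pvMinCols_le _ _ (List.mem_reverse.mp hr)

theorem pvMinCols_of_mem_nil (rows : List (List Int)) (h : [] ∈ rows) :
    pvMinCols rows = 0 :=
  Nat.le_zero.mp (pvMinCols_le rows [] h)

theorem pvMinCols_tail (rows : List (List Int)) (h1 : rows ≠ [])
    (h2 : ∀ r ∈ rows, r ≠ []) :
    pvMinCols (rows.map List.tail) = pvMinCols rows - 1 ∧ 1 ≤ pvMinCols rows := by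
  induction rows with
  | nil => exact absurd rfl h1
  | cons r rest ih =>
    have hr : 1 ≤ r.length :=
      List.length_pos_of_ne_nil (h2 r List.mem_cons_self)
    cases rest with
    | nil =>
      simp only [List.map_cons, List.map_nil, pvMinCols, List.foldl_nil]
      exact ⟨List.length_tail, hr⟩
    | cons s t =>
      obtain ⟨ih1, ih2⟩ := ih (by simp) (fun x hx => h2 x (List.mem_cons_of_mem _ hx))
      rw [List.map_cons, pvMinCols_cons, pvMinCols_cons]
      simp only [List.isEmpty_cons, Bool.false_eq_true, if_false,
        List.isEmpty_map] at *
      have htl : r.tail.length = r.length - 1 := List.length_tail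
      omega

theorem pyZipStar_eq (rows : List (List Int)) :
    pyZipStar rows =
      (List.range (pvMinCols rows)).map (fun i => rows.map (fun r => r.getD i 0)) := by
  suffices H : ∀ n (rows : List (List Int)), (rows.headD []).length = n →
      pyZipStar rows =
        (List.range (pvMinCols rows)).map (fun i => rows.map (fun r => r.getD i 0)) from
    H _ rows rfl
  intro n
  induction n using Nat.strong_induction_on with
  | _ n ih =>
    intro rows hn
    rw [pyZipStar.eq_def]
    split
    case isTrue h =>
      obtain ⟨h1, h2⟩ := h
      have hne : ∀ r ∈ rows, r ≠ [] := by
        intro r hr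
        have := List.all_eq_true.mp h2 r hr
        simpa [List.isEmpty_iff] using this
      have hlt : ((rows.map List.tail).headD []).length < n := by
        subst hn
        cases rows with
        | nil => exact absurd rfl h1
        | cons r rest =>
          have hr := hne r List.mem_cons_self
          cases r with
          | nil => exact absurd rfl hr
          | cons a as => simp
      rw [ih _ hlt (rows.map List.tail) rfl]
      obtain ⟨ht, hpos⟩ := pvMinCols_tail rows h1 hne
      have hm : pvMinCols rows = pvMinCols (rows.map List.tail) + 1 := by omega
      rw [hm, List.range_succ_eq_map]
      simp only [List.map_cons, List.map_map]
      congr 1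
      · exact List.map_congr_left (fun r _ => by cases r <;> rfl)
      · apply List.map_congr_left
        intro k _
        simp only [Function.comp_apply]
        apply List.map_congr_left
        intro r _
        cases r <;> simp
    case isFalse h =>
      rcases eq_or_ne rows [] with rfl | hne
      · rfl
      · have hx : ¬ (rows.all fun r => !r.isEmpty) = true := fun hall => h ⟨hne, hall⟩
        simp only [List.all_eq_true, not_forall] at hx
        obtain ⟨r, hr, hempty⟩ := hx
        have hrnil : r = [] := by
          simpa [List.isEmpty_iff] using hempty
        rw [pvMinCols_of_mem_nil rows (hrnil ▸ hr)]
        rfl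

-- A in closed form: output row i (i < pvMinCols), column j, sourced from matrix.reverse
theorem portA_closed (matrix : List (List Int)) :
    rotate_and_multiply_matrix matrix =
      (List.range (pvMinCols matrix)).map (fun i =>
        (List.range matrix.length).map (fun j =>
          ((matrix.reverse.getD j []).getD i 0) * ((i : Int) + (j : Int)))) := by
  unfold rotate_and_multiply_matrix
  have hzip := pyZipStar_eq matrix.reverse
  rw [pvMinCols_reverse] at hzip
  set m := pvMinCols matrix with hmdef
  simp only [hzip, PySem.List.len_eq, List.length_map, List.length_range,
    PySem.List.foldl_append_singleton_eq_map, List.nil_append,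
    PySem.List.pyRange_zero_natCast, List.map_map]
  apply List.map_congr_left
  intro i hi
  have him : i < m := List.mem_range.mp hi
  have hmpos : 0 < m := Nat.lt_of_le_of_lt (Nat.zero_le i) him
  have hrot0 : (((List.range m).map (fun i => matrix.reverse.map (fun r => r.getD i 0))).getD 0 []) =
      matrix.reverse.map (fun r => r.getD 0 0) := by
    rw [List.getD_eq_getElem _ _ (by simpa using hmpos)]
    simp
  have hroti : (((List.range m).map (fun i => matrix.reverse.map (fun r => r.getD i 0))).getD i []) =
      matrix.reverse.map (fun r => r.getD i 0) := by
    rw [List.getD_eq_getElem _ _ (by simpa using him)]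
    simp
  simp only [Function.comp_apply, PySem.List.pyGetD_zero, PySem.List.pyGetD_natCast,
    hrot0, hroti, List.length_map, List.length_reverse]
  apply List.map_congr_left
  intro j hj
  have hjR : j < matrix.reverse.length := by simpa using List.mem_range.mp hj
  simp only [Function.comp_apply, PySem.List.pyGetD_natCast]
  rw [List.getD_eq_getElem _ _ (by simpa using hjR), List.getElem_map,
    List.getD_eq_getElem matrix.reverse [] hjR]

-- one fold step of B on an accumulator of the shape (range m).map g
theorem stepB_char (g : Nat → List Int) (m : Nat) (r : List Int) (k : Int) :
    (PySem.List.enumerate (((List.range m).map g).zip r) 0).map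
        (fun p => p.2.1 ++ [p.2.2 * (p.1 + k)]) =
      (List.range (min m r.length)).map
        (fun i => g i ++ [r.getD i 0 * ((i : Int) + k)]) := by
  apply List.ext_getElem
  · simp [PySem.List.length_enumerate]
  · intro i h1 h2
    have hi : i < min m r.length := by
      simpa [PySem.List.length_enumerate] using h1
    have him : i < m := lt_of_lt_of_le hi (min_le_left _ _)
    have hir : i < r.length := lt_of_lt_of_le hi (min_le_right _ _)
    simp [PySem.List.getElem_enumerate, List.getElem_zip, List.getElem?_eq_getElem hir]

-- the whole fold of B, generalizing the accumulator shape and the enumerate offset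
theorem foldB_char (rest : List (List Int)) (k : Int) (g : Nat → List Int) (m : Nat) :
    (PySem.List.enumerate rest k).foldl
        (fun out jrow =>
          (PySem.List.enumerate (out.zip jrow.2) 0).map
            (fun p => p.2.1 ++ [p.2.2 * (p.1 + jrow.1)]))
        ((List.range m).map g) =
      (List.range (rest.foldl (fun a r => min a r.length) m)).map
        (fun i => g i ++ (List.range rest.length).map
          (fun j => ((rest.getD j []).getD i 0) * ((i : Int) + (k + (j : Int))))) := by
  induction rest generalizing k g m with
  | nil => simp
  | cons r rest ih =>
    rw [PySem.List.enumerate_cons, List.foldl_cons, stepB_char, ih]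
    simp only [List.foldl_cons]
    apply List.map_congr_left
    intro i _
    rw [List.append_assoc, List.singleton_append, List.length_cons,
      List.range_succ_eq_map, List.map_cons, List.map_map]
    congr 1
    congr 1
    · norm_num
    · apply List.map_congr_left
      intro j _
      simp only [Function.comp_apply, List.getD_cons_succ]
      congr 1
      push_cast
      ring

-- B in the same closed form
theorem portB_closed (matrix : List (List Int)) :
    rotate_and_multiply_matrix_alt matrix =
      (List.range (pvMinCols matrix)).map (fun i =>
        (List.range matrix.length).map (fun j =>
          ((matrix.reverse.getD j []).getD i 0) * ((i : Int) + (j : Int)))) := by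
  cases matrix with
  | nil => rfl
  | cons a l =>
    unfold rotate_and_multiply_matrix_alt
    -- init = (range m0).map (fun _ => []) with m0 the length of the last row
    have hlast : (a :: l).getLastD [] = (a :: l).reverse.headD [] := by
      rw [List.getLastD_eq_getLast?, List.headD_eq_head?, List.head?_reverse]
    obtain ⟨h, t, hrev⟩ : ∃ h t, (a :: l).reverse = h :: t := by
      cases hx : (a :: l).reverse with
      | nil => exact absurd (List.reverse_eq_nil_iff.mp hx) (by simp)
      | cons h t => exact ⟨h, t, rfl⟩
    have hinit : ((a :: l).getLastD []).map (fun _ => ([] : List Int)) =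
        (List.range h.length).map (fun _ => ([] : List Int)) := by
      rw [hlast, hrev]
      simp [List.map_const']
    simp only [List.isEmpty_cons, Bool.false_eq_true, if_false, hinit, hrev,
      PySem.List.enumerate_cons]
    rw [← PySem.List.enumerate_cons, ← hrev, foldB_char]
    have hM : (a :: l).reverse.foldl (fun a r => min a r.length) h.length =
        pvMinCols (a :: l) := by
      rw [← pvMinCols_reverse, hrev]
      simp [pvMinCols]
    rw [hM]
    apply List.map_congr_left
    intro i _
    have hlen : (a :: l).reverse.length = (a :: l).length := List.length_reverse
    rw [List.nil_append, hlen]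
    apply List.map_congr_left
    intro j _
    norm_num

-- ===== VERDICT (by name: the statement is the Claim_ definition above) =====
theorem rotate_and_multiply_matrix_spec : Claim_equal_rotate_and_multiply_matrix := by
  intro matrix _
  show rotate_and_multiply_matrix matrix = rotate_and_multiply_matrix_alt matrix
  rw [portA_closed, portB_closed]
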